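-- pv_equiv track=rewrite | github.com/alclass/cxlots | fs/mathfs/combinatorics/factoradic_to_from.py | calc_decimal_to_factoradic
-- ===== SOURCE A (Python) =====
-- def calc_decimal_to_factoradic(intval, radix=1, remainders=None):
--   """
--   resulted_perm_arr = [2, 7, 3, 5, 0, 8, 4, 1, 9, 6]
--
--   The step by step algorithmic formation of resulted_perm_arr:
--
--   Initial set: {0 1 2 3 4 5 6 7 8 9}
--   979999 / 9! = 2, remainder 254239 (ie 979999 - 725760)
--   permutation 1st digit: 2 | append it: ongoing_result = [2]
--
--   set: {0 1 3 4 5 6 7 8 9} <= 2 (former idx 2) got out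
--   254239 / 8! = 6, remainder 12319 (ie 254239 - 241920)
--   permutation 2nd digit: 7 | append it: ongoing_result = [2, 7]
--
--   set: {0 1 3 4 5 6 8 9} <= 7 (former idx 6) got out
--   12319 / 7! = 2, remainder 2239 (ie 12319 - 10080)
--   permutation 3rd digit: 3 | append it: ongoing_result = [2, 7, 3]
--
--   set: {0 1 4 5 6 8 9} <= 3 (former idx 2) got out
--   2239 / 6! = 3, remainder 79 (ie 2239 - 2160)
--   permutation 4th digit: 5 | append it: ongoing_result = [2, 7, 3, 5]
--
--   set: {0 1 4 6 8 9} <= 5 (former idx 3) got out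
--   79 / 5! = 0, remainder 79 (ie 79 - 0)
--   permutation 5th digit: 0 | append it: ongoing_result = [2, 7, 3, 5, 0]
--
--   set: {1 4 6 8 9} <= 0 (former idx 0) got out
--   79 / 4! = 3, remainder 7 (ie 79 - 72)
--   permutation 6th digit: 8 | append it: ongoing_result = [2, 7, 3, 5, 0, 8]
--
--   set: {1 4 6 9} <= 6 (former idx 3) got out
--   7 / 3! = 1, remainder 1 (ie 7 - 6)
--   permutation 7th digit: 4 | append it: ongoing_result = [2, 7, 3, 5, 0, 8, 4]
--
--   set: {1 6 9} <= 4 (former idx 1) got out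
--   1 / 2! = 0, remainder 1 (ie 1 - 0)
--   permutation 8th digit: 1 | append it: ongoing_result = [2, 7, 3, 5, 0, 8, 4, 1]
--
--   set: {6 9} <= 1 (former idx 0) got out
--   1 / 1! = 1, remainder 0 (ie 1 - 1)
--   permutation 9th digit: 9 | append it: ongoing_result = [2, 7, 3, 5, 0, 8, 4, 1, 9]
--
--   set: {6} <= 9 (former idx 1) got out, idx 0 is removed at this step
--   0 / 0! = 0, remainder 0 (ie 0 - 0)
--   permutation 10th digit: 6 | append it: ongoing_result = [2, 7, 3, 5, 0, 8, 4, 1, 9, 6]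
--                                                           its lgi_b0idx is 979999
--
--   Returns:
--     int | the decimal int value corresponding to input fatoradic number
--   """
--   remainders = [] if remainders is None else remainders
--   newintval = intval // radix
--   remainder = intval % radix
--   remainders.append(remainder)
--   if newintval == 0:
--     rev_rem = list(reversed(remainders))
--     factoradic_as_str = ''.join(map(str, rev_rem))
--     return factoradic_as_str
--   return calc_decimal_to_factoradic(newintval, radix=radix + 1, remainders=remainders)
-- ===== SOURCE B (Python) =====
-- def calc_decimal_to_factoradic(intval, radix=1, remainders=None):
--   if remainders is None:
--     remainders = []
--   tail = ''.join(str(d) for d in reversed(remainders))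
--   out = ''
--   while True:
--     intval, r = divmod(intval, radix)
--     remainders.append(r)
--     out = str(r) + out
--     if intval == 0:
--       return out + tail
--     radix += 1
-- ===== Notes on version B (the rewrite author's own statement) =====
-- stated objective: simpler
-- what changed: Replaces tail recursion that accumulates a remainder list and reverses+joins it at the end with an iterative divmod loop that builds the result string directly back-to-front (prepending each digit), so no list reversal of the new digits is needed; the caller-supplied remainders list is still mutated the same way.
-- outside the precondition, e.g. on calc_decimal_to_factoradic(700, -30, None): A returns '-24-20', B returns '-24-20'; on calc_decimal_to_factoradic(-1, 1, None): A raises RecursionError, B does not finish within the time limit; on calc_decimal_to_factoradic(5, 0, None): A raises ZeroDivisionError, B raises ZeroDivisionError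
import Mathlib
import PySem

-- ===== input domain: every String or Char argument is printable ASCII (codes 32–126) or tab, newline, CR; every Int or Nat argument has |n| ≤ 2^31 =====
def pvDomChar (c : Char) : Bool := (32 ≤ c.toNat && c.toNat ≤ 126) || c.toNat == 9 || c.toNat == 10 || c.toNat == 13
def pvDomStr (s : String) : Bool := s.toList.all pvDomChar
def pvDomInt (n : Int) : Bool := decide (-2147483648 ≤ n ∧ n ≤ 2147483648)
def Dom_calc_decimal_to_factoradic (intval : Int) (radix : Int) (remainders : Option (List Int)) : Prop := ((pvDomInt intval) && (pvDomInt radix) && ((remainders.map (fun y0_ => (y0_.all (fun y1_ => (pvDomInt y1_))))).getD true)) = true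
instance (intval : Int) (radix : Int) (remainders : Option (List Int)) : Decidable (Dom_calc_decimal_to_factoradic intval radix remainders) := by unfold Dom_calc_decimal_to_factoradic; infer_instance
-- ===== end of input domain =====

-- ===== PORT A =====
-- B builds the digit string iteratively, prepending each digit, instead of A's tail
-- recursion that reverses and joins an accumulated list at the end (objective: simpler).
-- Fuel (intval.toNat + 2) only makes the recursion total; on Pre_ it is never exhausted.
def factoGoA (fuel : Nat) (intval : Int) (radix : Int) (remainders : List Int) : String :=
  match fuel with
  | 0 => PySem.Str.join "" ((remainders.reverse).map PySem.Int.toStr)  -- fuel guard, unreachable on Pre_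
  | fuel + 1 =>
    let newintval := PySem.Int.floordiv intval radix
    let remainder := PySem.Int.mod intval radix
    let remainders := remainders ++ [remainder]
    if newintval = 0 then
      PySem.Str.join "" ((remainders.reverse).map PySem.Int.toStr)
    else
      factoGoA fuel newintval (radix + 1) remainders

def calc_decimal_to_factoradic (intval : Int) (radix : Int) (remainders : Option (List Int)) : String :=
  factoGoA (intval.toNat + 2) intval radix (remainders.getD [])

-- ===== PORT B =====
def factoGoB (fuel : Nat) (intval : Int) (radix : Int) (out : String) : String :=
  match fuel with
  | 0 => out  -- fuel guard, unreachable on Pre_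
  | fuel + 1 =>
    let q := PySem.Int.floordiv intval radix
    let r := PySem.Int.mod intval radix
    let out := PySem.Int.toStr r ++ out
    if q = 0 then out else factoGoB fuel q (radix + 1) out

def calc_decimal_to_factoradic_alt (intval : Int) (radix : Int) (remainders : Option (List Int)) : String :=
  let rems := remainders.getD []
  let tail := PySem.Str.join "" ((rems.reverse).map PySem.Int.toStr)
  factoGoB (intval.toNat + 2) intval radix "" ++ tail

-- ===== PRECONDITION & SPEC =====
-- Pre_ admits the natural domain intval >= 0 with radix >= 1 (radix's default is 1), plus the
-- degenerate nonpositive-radix corners where the quotient accidentally reaches 0 within the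
-- first two divisions; the remaining excluded inputs are ones where A raises (ZeroDivisionError
-- when the growing radix reaches 0, RecursionError when the quotient never reaches 0) apart
-- from rare accidental negative-radix terminations such as (700, -30, None), on which B
-- returns the same string as A.
def Pre_calc_decimal_to_factoradic (intval : Int) (radix : Int) (remainders : Option (List Int)) : Prop :=
  (0 ≤ intval ∧ 1 ≤ radix) ∨ (intval = 0 ∧ radix ≤ -1) ∨ (radix < intval ∧ intval ≤ 0) ∨
    (0 ≤ intval ∧ intval < -radix ∧ radix ≤ -3)
instance (intval : Int) (radix : Int) (remainders : Option (List Int)) : Decidable (Pre_calc_decimal_to_factoradic intval radix remainders) := by unfold Pre_calc_decimal_to_factoradic; infer_instance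

def pvWitness_calc_decimal_to_factoradic : Int × Int × Option (List Int) := (979999, 1, none)

def Spec_calc_decimal_to_factoradic (intval : Int) (radix : Int) (remainders : Option (List Int)) (out : String) : Prop := out = calc_decimal_to_factoradic_alt intval radix remainders
instance (intval : Int) (radix : Int) (remainders : Option (List Int)) (out : String) : Decidable (Spec_calc_decimal_to_factoradic intval radix remainders out) := by unfold Spec_calc_decimal_to_factoradic; infer_instance

-- ===== CLAIM (what is proved, stated in full; the proofs are below) =====
def Claim_equal_calc_decimal_to_factoradic : Prop := ∀ (intval : Int) (radix : Int) (remainders : Option (List Int)), Dom_calc_decimal_to_factoradic intval radix remainders → Pre_calc_decimal_to_factoradic intval radix remainders → Spec_calc_decimal_to_factoradic intval radix remainders (calc_decimal_to_factoradic intval radix remainders)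

-- ===== LEMMAS AND PROOFS =====

theorem pv_ofList_toChars (n : Int) : String.ofList (PySem.Int.toChars n) = PySem.Int.toStr n := by
  rw [← PySem.Int.toList_toStr, String.ofList_toList]

theorem pv_join_cons (c : List Char) (l : List (List Char)) :
    String.ofList (PySem.Chars.join [] (c :: l)) = String.ofList c ++ String.ofList (PySem.Chars.join [] l) := by
  cases l with
  | nil => simp [PySem.Chars.join, List.intercalate]
  | cons d t => simp [PySem.Chars.join, List.intercalate, List.intersperse]

theorem factoGoB_out (fuel : Nat) : ∀ (intval radix : Int) (out : String),
    factoGoB fuel intval radix out = factoGoB fuel intval radix "" ++ out := by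
  induction fuel with
  | zero => intro i r out; simp [factoGoB]
  | succ n ih =>
    intro i r out
    simp only [factoGoB]
    split_ifs with h
    · simp
    · rw [ih _ _ (PySem.Int.toStr (PySem.Int.mod i r) ++ out),
          ih _ _ (PySem.Int.toStr (PySem.Int.mod i r) ++ "")]
      simp [String.append_assoc]

theorem factoGo_eq (fuel : Nat) : ∀ (intval radix : Int) (rems : List Int),
    factoGoA fuel intval radix rems
      = factoGoB fuel intval radix "" ++ PySem.Str.join "" ((rems.reverse).map PySem.Int.toStr) := by
  induction fuel with
  | zero => intro i r rems; simp [factoGoA, factoGoB]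
  | succ n ih =>
    intro i r rems
    simp only [factoGoA, factoGoB]
    split_ifs with h
    · simp [PySem.Str.join, pv_join_cons, pv_ofList_toChars]
    · rw [ih, factoGoB_out n _ _ (PySem.Int.toStr (PySem.Int.mod i r) ++ "")]
      simp [PySem.Str.join, pv_join_cons, pv_ofList_toChars]
      rw [String.append_assoc]

-- ===== VERDICT (by name: the statement is the Claim_ definition above) =====
theorem calc_decimal_to_factoradic_spec : Claim_equal_calc_decimal_to_factoradic := by
  intro intval radix remainders _ _
  unfold Spec_calc_decimal_to_factoradic calc_decimal_to_factoradic calc_decimal_to_factoradic_alt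
  exact factoGo_eq _ _ _ _
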